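-- pv_equiv track=rewrite | github.com/shrijacked/Cognisync | src/cognisync/connectors.py | _normalize_weekdays
-- ===== SOURCE A (Python) =====
-- from typing import Dict, List, Optional
--
-- WEEKDAY_ORDER = ("mon", "tue", "wed", "thu", "fri", "sat", "sun")
--
-- class ConnectorError(RuntimeError):
--     pass
--
-- def _normalize_weekdays(weekdays: List[str]) -> List[str]:
--     normalized = []
--     for weekday in weekdays:
--         value = str(weekday).strip().lower()
--         if not value:
--             continue
--         if value not in WEEKDAY_ORDER:
--             raise ConnectorError(
--                 f"Unsupported weekday '{weekday}'. Expected one of: {', '.join(WEEKDAY_ORDER)}."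
--             )
--         if value not in normalized:
--             normalized.append(value)
--     normalized.sort(key=WEEKDAY_ORDER.index)
--     return normalized
-- ===== SOURCE B (Python) =====
-- WEEKDAY_ORDER = ("mon", "tue", "wed", "thu", "fri", "sat", "sun")
--
-- class ConnectorError(RuntimeError):
--     pass
--
-- def _normalize_weekdays(weekdays):
--     values = [str(w).strip().lower() for w in weekdays]
--     for weekday, value in zip(weekdays, values):
--         if value and value not in WEEKDAY_ORDER:
--             raise ConnectorError(
--                 f"Unsupported weekday '{weekday}'. Expected one of: {', '.join(WEEKDAY_ORDER)}."
--             )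
--     return [d for d in WEEKDAY_ORDER if d in values]
-- ===== Notes on version B (the rewrite author's own statement) =====
-- stated objective: simpler
-- what changed: Replaces A's single accumulator loop (append-dedup list, then sort keyed by WEEKDAY_ORDER.index) by three stages with no accumulator: map-normalize all entries, validate, then project the canonical WEEKDAY_ORDER through a membership filter, which makes dedup and sort unnecessary.
import Mathlib
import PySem

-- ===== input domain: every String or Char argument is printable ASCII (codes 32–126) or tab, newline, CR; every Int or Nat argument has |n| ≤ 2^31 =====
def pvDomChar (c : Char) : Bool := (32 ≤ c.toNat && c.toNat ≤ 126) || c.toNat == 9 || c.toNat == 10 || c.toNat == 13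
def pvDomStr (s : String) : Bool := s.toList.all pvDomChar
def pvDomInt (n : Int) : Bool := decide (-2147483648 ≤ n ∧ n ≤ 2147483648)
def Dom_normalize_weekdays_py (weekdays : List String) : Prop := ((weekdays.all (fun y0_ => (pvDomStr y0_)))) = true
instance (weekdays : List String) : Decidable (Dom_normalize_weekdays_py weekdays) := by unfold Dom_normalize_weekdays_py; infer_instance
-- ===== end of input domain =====

-- B replaces A's accumulator loop (append-dedup + sort by WEEKDAY_ORDER.index) with three
-- accumulator-free stages: map-normalize, validate, filter the canonical order (objective: simpler).
-- Both programs raise ConnectorError on an invalid weekday; those inputs are outside Pre_.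

def wkOrder : List String := ["mon", "tue", "wed", "thu", "fri", "sat", "sun"]

-- ===== PORT A =====
-- the loop of A; `none` = the raise of ConnectorError
def aLoop : List String → List String → Option (List String)
  | [], normalized => some normalized
  | weekday :: ws, normalized =>
    let value := PySem.Str.lower (PySem.Str.strip weekday)
    if value = "" then aLoop ws normalized
    else if value ∈ wkOrder then
      aLoop ws (if value ∈ normalized then normalized else normalized ++ [value])
    else none

def normalize_weekdays_py (weekdays : List String) : List String :=
  match aLoop weekdays [] with
  | some normalized =>
      PySem.List.sorted normalized (fun v => (PySem.List.index? wkOrder v).getD 0) false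
  | none => []   -- unreachable under Pre_ (A raises there)

-- ===== PORT B =====
-- stage 1 of B: the list comprehension normalizing every entry
def normValues (weekdays : List String) : List String :=
  weekdays.map (fun w => PySem.Str.lower (PySem.Str.strip w))

def normalize_weekdays_py_alt (weekdays : List String) : List String :=
  let values := normValues weekdays
  -- stage 2: the validation pass (B raises on any nonempty value outside WEEKDAY_ORDER)
  if values.any (fun v => !(v == "" || wkOrder.contains v)) then []  -- unreachable under Pre_ (B raises there)
  -- stage 3: project the canonical order through membership in values
  else wkOrder.filter (fun d => values.contains d)

-- ===== PRECONDITION & SPEC =====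
-- Pre_ excludes exactly the inputs on which A (and B) raise ConnectorError:
-- some entry whose stripped, lowercased form is nonempty and not a weekday name.
def Pre_normalize_weekdays_py (weekdays : List String) : Prop :=
  ∀ w ∈ weekdays, PySem.Str.lower (PySem.Str.strip w) = "" ∨
    PySem.Str.lower (PySem.Str.strip w) ∈ wkOrder
instance (weekdays : List String) : Decidable (Pre_normalize_weekdays_py weekdays) := by
  unfold Pre_normalize_weekdays_py; infer_instance

def pvWitness_normalize_weekdays_py : List String := ["Mon", " tue ", "", "mon", "SUN"]

def Spec_normalize_weekdays_py (weekdays : List String) (out : List String) : Prop := out = normalize_weekdays_py_alt weekdays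
instance (weekdays : List String) (out : List String) : Decidable (Spec_normalize_weekdays_py weekdays out) := by unfold Spec_normalize_weekdays_py; infer_instance

-- ===== CLAIM (what is proved, stated in full; the proofs are below) =====
def Claim_equal_normalize_weekdays_py : Prop := ∀ (weekdays : List String), Dom_normalize_weekdays_py weekdays → Pre_normalize_weekdays_py weekdays → Spec_normalize_weekdays_py weekdays (normalize_weekdays_py weekdays)

-- ===== LEMMAS AND PROOFS =====

-- under Pre_, A's loop returns, preserves nodup, and its result's members are
-- exactly acc's members plus the normalized input values that lie in wkOrder
theorem aLoop_char (ws : List String) (acc : List String)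
    (hpre : ∀ w ∈ ws, PySem.Str.lower (PySem.Str.strip w) = "" ∨
      PySem.Str.lower (PySem.Str.strip w) ∈ wkOrder)
    (hnd : acc.Nodup) :
    ∃ s, aLoop ws acc = some s ∧ s.Nodup ∧
      (∀ x, x ∈ s ↔ x ∈ acc ∨ (x ∈ normValues ws ∧ x ∈ wkOrder)) := by
  induction ws generalizing acc with
  | nil => exact ⟨acc, rfl, hnd, by simp [normValues]⟩
  | cons w ws ih =>
    have hw := hpre w (by simp)
    have hrest : ∀ w' ∈ ws, PySem.Str.lower (PySem.Str.strip w') = "" ∨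
        PySem.Str.lower (PySem.Str.strip w') ∈ wkOrder := fun w' hw' => hpre w' (by simp [hw'])
    simp only [aLoop]
    rcases hw with h | h
    · rw [if_pos h]
      obtain ⟨s, hs, hnd', hmem⟩ := ih acc hrest hnd
      refine ⟨s, hs, hnd', fun x => ?_⟩
      rw [hmem x]
      constructor
      · rintro (hx | hx)
        · exact Or.inl hx
        · exact Or.inr ⟨by simp [normValues]; exact Or.inr (by simpa [normValues] using hx.1), hx.2⟩
      · rintro (hx | ⟨hx1, hx2⟩)
        · exact Or.inl hx
        · simp only [normValues, List.map_cons, List.mem_cons] at hx1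
          rcases hx1 with hx1 | hx1
          · exfalso; rw [hx1, h] at hx2; revert hx2; decide
          · exact Or.inr ⟨by simpa [normValues] using hx1, hx2⟩
    · by_cases he : PySem.Str.lower (PySem.Str.strip w) = ""
      · exfalso; rw [he] at h; revert h; decide
      · rw [if_neg he, if_pos h]
        set v := PySem.Str.lower (PySem.Str.strip w) with hv
        have hnd2 : (if v ∈ acc then acc else acc ++ [v]).Nodup := by
          split_ifs with hc
          · exact hnd
          · refine hnd.append (List.nodup_singleton _) ?_
            intro a ha hb
            exact hc ((List.mem_singleton.1 hb) ▸ ha)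
        obtain ⟨s, hs, hnd', hmem⟩ := ih _ hrest hnd2
        refine ⟨s, hs, hnd', fun x => ?_⟩
        rw [hmem x]
        have hacc : x ∈ (if v ∈ acc then acc else acc ++ [v]) ↔ x ∈ acc ∨ x = v := by
          split_ifs with hc
          · constructor
            · exact Or.inl
            · rintro (hx | rfl) <;> [exact hx; exact hc]
          · simp
        rw [hacc]
        simp only [normValues, List.map_cons, List.mem_cons]
        constructor
        · rintro ((hx | rfl) | ⟨hx1, hx2⟩)
          · exact Or.inl hx
          · exact Or.inr ⟨Or.inl hv, h⟩
          · exact Or.inr ⟨Or.inr (by simpa [normValues] using hx1), hx2⟩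
        · rintro (hx | ⟨hx1 | hx1, hx2⟩)
          · exact Or.inl (Or.inl hx)
          · exact Or.inl (Or.inr hx1)
          · exact Or.inr ⟨by simpa [normValues] using hx1, hx2⟩

-- a nodup list with the same members as 'wkOrder restricted to p', sorted by
-- index into wkOrder, is exactly wkOrder.filter p
theorem sorted_eq_filter (s : List String) (p : String → Bool) (hnd : s.Nodup)
    (hmem : ∀ x, x ∈ s ↔ x ∈ wkOrder ∧ p x = true) :
    PySem.List.sorted s (fun v => (PySem.List.index? wkOrder v).getD 0) false =
      wkOrder.filter p := by
  apply PySem.List.sorted_eq_of_perm_of_pairwise_lt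
  · rw [List.perm_ext_iff_of_nodup (List.Nodup.filter _ (by decide)) hnd]
    intro a
    simp [List.mem_filter, hmem a]
  · have h7 : wkOrder.Pairwise (fun a b =>
        (PySem.List.index? wkOrder a).getD 0 < (PySem.List.index? wkOrder b).getD 0) := by
      decide
    exact List.Pairwise.filter _ h7

-- ===== VERDICT (by name: the statement is the Claim_ definition above) =====
theorem normalize_weekdays_py_spec : Claim_equal_normalize_weekdays_py := by
  intro weekdays _ hpre
  obtain ⟨s, ha, hnd, hmem⟩ := aLoop_char weekdays [] hpre List.nodup_nil
  have hvalid : (normValues weekdays).any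
      (fun v => !(v == "" || wkOrder.contains v)) = false := by
    simp only [List.any_eq_false, normValues, List.mem_map]
    rintro v ⟨w, hw, rfl⟩
    rcases hpre w hw with h | h <;> simp [h]
  simp only [Spec_normalize_weekdays_py, normalize_weekdays_py, normalize_weekdays_py_alt,
    ha, hvalid, Bool.false_eq_true, if_false]
  refine sorted_eq_filter s _ hnd fun x => ?_
  rw [hmem x]
  simp only [List.mem_nil_iff, false_or, List.contains_eq_mem, decide_eq_true_eq]
  tauto
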